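-- pv_equiv track=rewrite | github.com/crapas1974/algo2 | result/path/01_every_path.py | count_and_path_top_down
-- ===== SOURCE A (Python) =====
-- def count_and_path_top_down(m, n, memo = None):
--     if memo == None:
--         memo = {}
--     if (m, n) in memo:
--         return memo[(m, n)]
--     if m == 1 and n == 1:
--         memo[(1, 1)] = (1, [''])
--         return memo[(1, 1)]
--     paths = []
--     count = 0
--     if m != 1:
--         left_count, left_paths = count_and_path_top_down(m - 1, n, memo)
--         paths += ['R' + left_path for left_path in left_paths]
--         count += left_count
--     if n != 1:
--         up_count, up_paths = count_and_path_top_down(m, n - 1, memo)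
--         paths += ['D' + up_path for up_path in up_paths]
--         count += up_count
--     memo[(m, n)] = (count, paths)
--     return memo[(m, n)]
-- ===== SOURCE B (Python) =====
-- def count_and_path_top_down(m, n, memo=None):
--     # Bottom-up DP over the grid (return value equivalent to the recursive
--     # version; both mutate memo, though not necessarily with the same cells).
--     if memo == None:
--         memo = {}
--     if (m, n) in memo:
--         return memo[(m, n)]
--     dp = {}
--     for i in range(1, m + 1):
--         for j in range(1, n + 1):
--             if (i, j) in memo:
--                 dp[(i, j)] = memo[(i, j)]
--             elif i == 1 and j == 1:
--                 dp[(i, j)] = (1, [''])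
--             else:
--                 count = 0
--                 paths = []
--                 if i != 1:
--                     left_count, left_paths = dp[(i - 1, j)]
--                     count += left_count
--                     paths += ['R' + p for p in left_paths]
--                 if j != 1:
--                     up_count, up_paths = dp[(i, j - 1)]
--                     count += up_count
--                     paths += ['D' + p for p in up_paths]
--                 dp[(i, j)] = (count, paths)
--     memo.update(dp)
--     return dp[(m, n)]
-- ===== Notes on version B (the rewrite author's own statement) =====
-- stated objective: alternative
-- what changed: Replaces the top-down memoized recursion with an iterative bottom-up DP that fills a row-major table dp[(i,j)] and reads off dp[(m,n)]; no recursion, same R-before-D path order.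
-- outside the precondition, e.g. on count_and_path_top_down(0, 1, {(-1, 1): (1, ['x'])}): A returns (1, ['Rx']), B raises KeyError
import Mathlib
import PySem

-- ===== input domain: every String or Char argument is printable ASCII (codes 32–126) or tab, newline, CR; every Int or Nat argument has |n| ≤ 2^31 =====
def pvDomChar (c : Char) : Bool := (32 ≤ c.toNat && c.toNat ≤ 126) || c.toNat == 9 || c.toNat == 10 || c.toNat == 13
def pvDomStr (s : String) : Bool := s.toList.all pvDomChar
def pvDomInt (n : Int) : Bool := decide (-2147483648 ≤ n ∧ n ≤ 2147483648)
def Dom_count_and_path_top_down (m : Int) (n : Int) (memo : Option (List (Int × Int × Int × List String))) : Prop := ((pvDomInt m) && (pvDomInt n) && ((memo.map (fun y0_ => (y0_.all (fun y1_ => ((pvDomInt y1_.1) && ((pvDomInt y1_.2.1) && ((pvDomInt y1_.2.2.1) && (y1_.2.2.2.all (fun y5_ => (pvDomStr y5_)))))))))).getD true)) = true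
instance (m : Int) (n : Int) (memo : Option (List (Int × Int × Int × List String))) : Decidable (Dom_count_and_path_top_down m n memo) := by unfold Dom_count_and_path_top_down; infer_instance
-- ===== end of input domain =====

-- B replaces the top-down memoized recursion with an iterative bottom-up DP table
-- (alternative decomposition, similar cost); equivalence is about the RETURN value
-- only (both Pythons mutate `memo`, though not necessarily with the same cells).


-- shared input decoding: the Python `memo` argument is a dict[(int,int), (int, list[str])]
def pvMemoDict (memo : Option (List (Int × Int × Int × List String))) :
    PySem.Dict (Int × Int) (Int × List String) :=
  PySem.Dict.ofList ((memo.getD []).map (fun e => ((e.1, e.2.1), (e.2.2.1, e.2.2.2))))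

-- ===== PORT A =====
-- A's recursion with the mutated memo threaded explicitly.  The fuel argument only
-- makes the recursion structural: it runs out exactly where the Python recursion
-- would not terminate (m ≤ 0 or n ≤ 0 with no memo hit — RecursionError, excluded
-- by Pre_); the top-level call supplies enough fuel for every input Pre_ admits.
def pvGoA (fuel : Nat) (m n : Int)
    (memo : PySem.Dict (Int × Int) (Int × List String)) :
    (Int × List String) × PySem.Dict (Int × Int) (Int × List String) :=
  match fuel with
  | 0 => ((0, []), memo)
  | fuel + 1 =>
    match memo.get? (m, n) with
    | some v => (v, memo)
    | none =>
      if m = 1 ∧ n = 1 then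
        -- memo[(1, 1)] = (1, ['']); return memo[(1, 1)]
        ((1, [""]), memo.insert (1, 1) (1, [""]))
      else
        -- paths = []; count = 0; then the two accumulation branches
        let s1 : (Int × List String) × PySem.Dict (Int × Int) (Int × List String) :=
          if m ≠ 1 then
            let r := pvGoA fuel (m - 1) n memo
            ((0 + r.1.1, ([] : List String) ++ r.1.2.map (fun p => "R" ++ p)), r.2)
          else ((0, []), memo)
        let s2 : (Int × List String) × PySem.Dict (Int × Int) (Int × List String) :=
          if n ≠ 1 then
            let r := pvGoA fuel m (n - 1) s1.2
            ((s1.1.1 + r.1.1, s1.1.2 ++ r.1.2.map (fun p => "D" ++ p)), r.2)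
          else s1
        -- memo[(m, n)] = (count, paths); return memo[(m, n)]
        (s2.1, s2.2.insert (m, n) s2.1)

def count_and_path_top_down (m : Int) (n : Int) (memo : Option (List (Int × Int × Int × List String))) : Int × List String :=
  (pvGoA (m.toNat + n.toNat + 1) m n (pvMemoDict memo)).1

-- ===== PORT B =====
-- the body of B's inner loop: the value stored at dp[(i, j)]
def pvCellB (d dp : PySem.Dict (Int × Int) (Int × List String)) (i j : Int) :
    Int × List String :=
  match d.get? (i, j) with
  | some v => v
  | none =>
    if i = 1 ∧ j = 1 then (1, [""])
    else
      -- count = 0; paths = []; then the two accumulation branches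
      let s1 : Int × List String :=
        if i ≠ 1 then
          let r := dp.getD (i - 1, j) (0, [])  -- dp[(i-1,j)]: present for every loop cell
          (0 + r.1, ([] : List String) ++ r.2.map (fun p => "R" ++ p))
        else (0, [])
      let s2 : Int × List String :=
        if j ≠ 1 then
          let r := dp.getD (i, j - 1) (0, [])  -- dp[(i,j-1)]: present for every loop cell
          (s1.1 + r.1, s1.2 ++ r.2.map (fun p => "D" ++ p))
        else s1
      s2

-- bottom-up DP over the grid in row-major order, then dp[(m, n)] (Python raises
-- KeyError there when m ≤ 0 or n ≤ 0 — outside Pre_ — hence the total getD)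
def count_and_path_top_down_alt (m : Int) (n : Int) (memo : Option (List (Int × Int × Int × List String))) : Int × List String :=
  let d := pvMemoDict memo
  match d.get? (m, n) with
  | some v => v
  | none =>
    let dp :=
      (PySem.List.pyRange 1 (m + 1) 1).foldl (fun dp i =>
        (PySem.List.pyRange 1 (n + 1) 1).foldl (fun dp j =>
          dp.insert (i, j) (pvCellB d dp i j)) dp)
        (PySem.Dict.empty : PySem.Dict (Int × Int) (Int × List String))
    dp.getD (m, n) (0, [])

-- ===== PRECONDITION & SPEC =====
-- Pre_ excludes the inputs whose recursion leaves the 1-based grid (m ≤ 0 or n ≤ 0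
-- without a memo entry at (m, n)): A raises RecursionError there except when a
-- memoized off-grid cell happens to stop the recursion (then A returns a value
-- built from it), and B's bottom-up table raises KeyError on all of them.
def Pre_count_and_path_top_down (m : Int) (n : Int) (memo : Option (List (Int × Int × Int × List String))) : Prop :=
  (∃ e ∈ memo.getD [], e.1 = m ∧ e.2.1 = n) ∨ (1 ≤ m ∧ 1 ≤ n)
instance (m : Int) (n : Int) (memo : Option (List (Int × Int × Int × List String))) : Decidable (Pre_count_and_path_top_down m n memo) := by unfold Pre_count_and_path_top_down; infer_instance

def pvWitness_count_and_path_top_down : Int × Int × (Option (List (Int × Int × Int × List String))) := (2, 2, none)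

def Spec_count_and_path_top_down (m : Int) (n : Int) (memo : Option (List (Int × Int × Int × List String))) (out : Int × List String) : Prop := out = count_and_path_top_down_alt m n memo
instance (m : Int) (n : Int) (memo : Option (List (Int × Int × Int × List String))) (out : Int × List String) : Decidable (Spec_count_and_path_top_down m n memo out) := by unfold Spec_count_and_path_top_down; infer_instance

-- ===== CLAIM (what is proved, stated in full; the proofs are below) =====
def Claim_equal_count_and_path_top_down : Prop := ∀ (m : Int) (n : Int) (memo : Option (List (Int × Int × Int × List String))), Dom_count_and_path_top_down m n memo → Pre_count_and_path_top_down m n memo → Spec_count_and_path_top_down m n memo (count_and_path_top_down m n memo)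

-- ===== LEMMAS AND PROOFS =====

def pvF (d : PySem.Dict (Int × Int) (Int × List String)) : Nat → Nat → Int × List String
  | 0, 0 => (d.get? (1, 1)).getD (1, [""])
  | a + 1, 0 =>
    (d.get? (((a : Int) + 1) + 1, 1)).getD
      ((pvF d a 0).1, (pvF d a 0).2.map (fun p => "R" ++ p))
  | 0, b + 1 =>
    (d.get? (1, ((b : Int) + 1) + 1)).getD
      ((pvF d 0 b).1, (pvF d 0 b).2.map (fun p => "D" ++ p))
  | a + 1, b + 1 =>
    (d.get? (((a : Int) + 1) + 1, ((b : Int) + 1) + 1)).getD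
      ((pvF d a (b + 1)).1 + (pvF d (a + 1) b).1,
       (pvF d a (b + 1)).2.map (fun p => "R" ++ p) ++ (pvF d (a + 1) b).2.map (fun p => "D" ++ p))

lemma pvF_of_some (d : PySem.Dict (Int × Int) (Int × List String)) (a b : Nat)
    (v : Int × List String) (h : d.get? ((a : Int) + 1, (b : Int) + 1) = some v) :
    pvF d a b = v := by
  match a, b with
  | 0, 0 => simpa [pvF] using congrArg (Option.getD · (1, [""])) h
  | a + 1, 0 => rw [pvF]; push_cast at h ⊢; rw [h]; rfl
  | 0, b + 1 => rw [pvF]; push_cast at h ⊢; rw [h]; rfl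
  | a + 1, b + 1 => rw [pvF]; push_cast at h ⊢; rw [h]; rfl

def pvInv (d mem : PySem.Dict (Int × Int) (Int × List String)) : Prop :=
  (∀ k v, d.get? k = some v → mem.get? k = some v) ∧
  (∀ (a b : Nat) (v : Int × List String),
      mem.get? ((a : Int) + 1, (b : Int) + 1) = some v → v = pvF d a b)

lemma pvInv_insert (d mem : PySem.Dict (Int × Int) (Int × List String))
    (a b : Nat) (hinv : pvInv d mem)
    (hd : d.get? ((a : Int) + 1, (b : Int) + 1) = none) :
    pvInv d (mem.insert ((a : Int) + 1, (b : Int) + 1) (pvF d a b)) := by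
  obtain ⟨h1, h2⟩ := hinv
  constructor
  · intro k v hk
    rcases eq_or_ne k ((a : Int) + 1, (b : Int) + 1) with rfl | hne
    · rw [hk] at hd; cases hd
    · rw [PySem.Dict.get?_insert_of_ne _ _ hne]; exact h1 k v hk
  · intro a' b' v hv
    rcases eq_or_ne (((a' : Int) + 1, (b' : Int) + 1) : Int × Int)
        (((a : Int) + 1), ((b : Int) + 1)) with heq | hne
    · have haa : a' = a ∧ b' = b := by
        have h1' := congrArg Prod.fst heq
        have h2' := congrArg Prod.snd heq
        simp only at h1' h2'
        omega
      obtain ⟨rfl, rfl⟩ := haa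
      rw [heq, PySem.Dict.get?_insert_self] at hv
      exact (Option.some.injEq _ _ ▸ hv).symm
    · rw [PySem.Dict.get?_insert_of_ne _ _ hne] at hv
      exact h2 a' b' v hv

lemma pvGoA_correct (d : PySem.Dict (Int × Int) (Int × List String)) :
    ∀ (fuel a b : Nat) (mem : PySem.Dict (Int × Int) (Int × List String)),
      pvInv d mem → a + b < fuel →
      (pvGoA fuel ((a : Int) + 1) ((b : Int) + 1) mem).1 = pvF d a b ∧
        pvInv d (pvGoA fuel ((a : Int) + 1) ((b : Int) + 1) mem).2 := by
  intro fuel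
  induction fuel with
  | zero => intro a b mem _ h; omega
  | succ fuel ih =>
    intro a b mem hinv _hfuel
    rw [pvGoA]
    cases hget : mem.get? ((a : Int) + 1, (b : Int) + 1) with
    | some v =>
      refine ⟨?_, ?_⟩
      · show v = pvF d a b
        exact hinv.2 a b v hget
      · show pvInv d mem
        exact hinv
    | none =>
      have hd : d.get? ((a : Int) + 1, (b : Int) + 1) = none := by
        cases hd' : d.get? ((a : Int) + 1, (b : Int) + 1) with
        | none => rfl
        | some w => rw [hinv.1 _ _ hd'] at hget; cases hget
      by_cases hab : ((a : Int) + 1 = 1 ∧ (b : Int) + 1 = 1)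
      · obtain ⟨rfl, rfl⟩ : a = 0 ∧ b = 0 := by omega
        rw [if_pos hab]
        have hd' : d.get? (1, 1) = none := by simpa using hd
        have hF : pvF d 0 0 = (1, [""]) := by simp [pvF, hd']
        refine ⟨hF.symm, ?_⟩
        have h := pvInv_insert d mem 0 0 hinv hd
        rw [hF] at h
        simpa using h
      · rw [if_neg hab]
        dsimp only []
        rcases Nat.eq_zero_or_pos a with rfl | hapos <;> rcases Nat.eq_zero_or_pos b with rfl | hbpos
        · exact absurd (by norm_num) hab
        · -- a = 0, b > 0
          obtain ⟨b', rfl⟩ : ∃ b', b = b' + 1 := ⟨b - 1, by omega⟩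
          have c1 : ¬(((0 : Nat) : Int) + 1 ≠ 1) := by norm_num
          have c2 : (((b' + 1 : Nat) : Int) + 1 ≠ 1) := by push_cast; omega
          rw [if_neg c1, if_pos c2]
          have hB : (((b' + 1 : Nat) : Int) + 1 - 1) = ((b' : Int) + 1) := by push_cast; ring
          rw [hB]
          have hrec := ih 0 b' mem hinv (by omega)
          set r := pvGoA fuel (((0 : Nat) : Int) + 1) ((b' : Int) + 1) mem with hr
          have hval : ((0 : Int) + r.1.1, ([] : List String) ++ r.1.2.map (fun p => "D" ++ p))
              = pvF d 0 (b' + 1) := by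
            rw [hrec.1, pvF]
            push_cast at hd ⊢
            rw [hd]
            simp
          refine ⟨?_, ?_⟩
          · exact hval
          · have h := pvInv_insert d r.2 0 (b' + 1) hrec.2 hd
            rw [← hval] at h
            exact h
        · -- a > 0, b = 0
          obtain ⟨a', rfl⟩ : ∃ a', a = a' + 1 := ⟨a - 1, by omega⟩
          have c1 : (((a' + 1 : Nat) : Int) + 1 ≠ 1) := by push_cast; omega
          have c2 : ¬(((0 : Nat) : Int) + 1 ≠ 1) := by norm_num
          rw [if_pos c1, if_neg c2]
          have hA : (((a' + 1 : Nat) : Int) + 1 - 1) = ((a' : Int) + 1) := by push_cast; ring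
          rw [hA]
          have hrec := ih a' 0 mem hinv (by omega)
          set r := pvGoA fuel ((a' : Int) + 1) (((0 : Nat) : Int) + 1) mem with hr
          have hval : ((0 : Int) + r.1.1, ([] : List String) ++ r.1.2.map (fun p => "R" ++ p))
              = pvF d (a' + 1) 0 := by
            rw [hrec.1, pvF]
            push_cast at hd ⊢
            rw [hd]
            simp
          refine ⟨?_, ?_⟩
          · exact hval
          · have h := pvInv_insert d r.2 (a' + 1) 0 hrec.2 hd
            rw [← hval] at h
            exact h
        · -- a > 0, b > 0
          obtain ⟨a', rfl⟩ : ∃ a', a = a' + 1 := ⟨a - 1, by omega⟩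
          obtain ⟨b', rfl⟩ : ∃ b', b = b' + 1 := ⟨b - 1, by omega⟩
          have c1 : (((a' + 1 : Nat) : Int) + 1 ≠ 1) := by push_cast; omega
          have c2 : (((b' + 1 : Nat) : Int) + 1 ≠ 1) := by push_cast; omega
          rw [if_pos c1, if_pos c2]
          have hA : (((a' + 1 : Nat) : Int) + 1 - 1) = ((a' : Int) + 1) := by push_cast; ring
          have hB : (((b' + 1 : Nat) : Int) + 1 - 1) = ((b' : Int) + 1) := by push_cast; ring
          rw [hA, hB]
          have hrec1 := ih a' (b' + 1) mem hinv (by omega)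
          set r1 := pvGoA fuel ((a' : Int) + 1) (((b' + 1 : Nat) : Int) + 1) mem with hr1
          have hrec2 := ih (a' + 1) b' r1.2 hrec1.2 (by omega)
          set r2 := pvGoA fuel (((a' + 1 : Nat) : Int) + 1) ((b' : Int) + 1) r1.2 with hr2
          have hval : ((0 : Int) + r1.1.1 + r2.1.1,
              (([] : List String) ++ r1.1.2.map (fun p => "R" ++ p)) ++ r2.1.2.map (fun p => "D" ++ p))
              = pvF d (a' + 1) (b' + 1) := by
            rw [hrec1.1, hrec2.1, pvF]
            push_cast at hd ⊢
            rw [hd]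
            simp
          refine ⟨?_, ?_⟩
          · exact hval
          · have h := pvInv_insert d r2.2 (a' + 1) (b' + 1) hrec2.2 hd
            rw [← hval] at h
            exact h

def pvRowsInv (d dp : PySem.Dict (Int × Int) (Int × List String)) (nN ac : Nat) : Prop :=
  ∀ a' b' : Nat, a' < ac → b' < nN →
    dp.get? ((a' : Int) + 1, (b' : Int) + 1) = some (pvF d a' b')

def pvRowInv (d dp : PySem.Dict (Int × Int) (Int × List String)) (nN ac jc : Nat) : Prop :=
  pvRowsInv d dp nN ac ∧
  ∀ b' : Nat, b' < jc → dp.get? ((ac : Int) + 1, (b' : Int) + 1) = some (pvF d ac b')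


lemma pvCellB_correct (d dp : PySem.Dict (Int × Int) (Int × List String))
    (nN a jc : Nat) (hjc : jc < nN) (hinv : pvRowInv d dp nN a jc) :
    pvCellB d dp ((a : Int) + 1) ((jc : Int) + 1) = pvF d a jc := by
  obtain ⟨hrows, hrow⟩ := hinv
  unfold pvCellB
  cases hd : d.get? ((a : Int) + 1, (jc : Int) + 1) with
  | some v => exact (pvF_of_some d a jc v hd).symm
  | none =>
    rcases Nat.eq_zero_or_pos a with rfl | hapos <;> rcases Nat.eq_zero_or_pos jc with rfl | hjpos
    · -- a = 0, jc = 0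
      rw [if_pos (by norm_num)]
      have hd' : d.get? (1, 1) = none := by simpa using hd
      simp [pvF, hd']
    · -- a = 0, jc > 0
      obtain ⟨j', rfl⟩ : ∃ j', jc = j' + 1 := ⟨jc - 1, by omega⟩
      have cj : ¬((((j' + 1 : Nat)) : Int) + 1 = 1) := by push_cast; omega
      have hU' : dp.getD (((0 : Nat) : Int) + 1, (j' : Int) + 1) (0, []) = pvF d 0 j' := by
        apply PySem.Dict.getD_of_get?_eq_some
        exact hrow j' (by omega)
      rw [pvF]
      push_cast at hd cj hU' ⊢
      rw [hd]
      simp [cj, hU']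
    · -- a > 0, jc = 0
      obtain ⟨a', rfl⟩ : ∃ a', a = a' + 1 := ⟨a - 1, by omega⟩
      have ca : ¬((((a' + 1 : Nat)) : Int) + 1 = 1) := by push_cast; omega
      have hL' : dp.getD ((a' : Int) + 1, ((0 : Nat) : Int) + 1) (0, []) = pvF d a' 0 := by
        apply PySem.Dict.getD_of_get?_eq_some
        exact hrows a' 0 (by omega) (by omega)
      rw [pvF]
      push_cast at hd ca hL' ⊢
      rw [hd]
      simp [ca, hL']
    · -- a > 0, jc > 0
      obtain ⟨a', rfl⟩ : ∃ a', a = a' + 1 := ⟨a - 1, by omega⟩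
      obtain ⟨j', rfl⟩ : ∃ j', jc = j' + 1 := ⟨jc - 1, by omega⟩
      have ca : ¬((((a' + 1 : Nat)) : Int) + 1 = 1) := by push_cast; omega
      have cj : ¬((((j' + 1 : Nat)) : Int) + 1 = 1) := by push_cast; omega
      have hL' : dp.getD ((a' : Int) + 1, ((j' + 1 : Nat) : Int) + 1) (0, []) = pvF d a' (j' + 1) := by
        apply PySem.Dict.getD_of_get?_eq_some
        exact hrows a' (j' + 1) (by omega) (by omega)
      have hU' : dp.getD (((a' + 1 : Nat) : Int) + 1, (j' : Int) + 1) (0, []) = pvF d (a' + 1) j' := by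
        apply PySem.Dict.getD_of_get?_eq_some
        exact hrow j' (by omega)
      rw [pvF]
      push_cast at hd ca cj hL' hU' ⊢
      rw [hd]
      simp [ca, cj, hL', hU']

lemma pvRow_correct (d : PySem.Dict (Int × Int) (Int × List String)) (n : Int)
    (a : Nat) :
    ∀ (jc : Nat) (dp : PySem.Dict (Int × Int) (Int × List String)),
      jc ≤ n.toNat → pvRowInv d dp n.toNat a 0 →
      pvRowInv d
        ((List.range jc).foldl
          (fun dp (k : Nat) => dp.insert ((1 : Int) + (a : Int), (1 : Int) + (k : Int))
            (pvCellB d dp ((1 : Int) + (a : Int)) ((1 : Int) + (k : Int)))) dp)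
        n.toNat a jc := by
  intro jc
  induction jc with
  | zero => intro dp _ h; simpa using h
  | succ jc ih =>
    intro dp hle h0
    rw [List.range_succ, List.foldl_append]
    set dp' := (List.range jc).foldl
      (fun dp (k : Nat) => dp.insert ((1 : Int) + (a : Int), (1 : Int) + (k : Int))
        (pvCellB d dp ((1 : Int) + (a : Int)) ((1 : Int) + (k : Int)))) dp with hdp'
    have hinv' : pvRowInv d dp' n.toNat a jc := ih dp (by omega) h0
    simp only [List.foldl_cons, List.foldl_nil]
    have hk : ((1 : Int) + (jc : Int)) = (jc : Int) + 1 := by ring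
    have hk2 : ((1 : Int) + (a : Int)) = (a : Int) + 1 := by ring
    rw [hk, hk2]
    have hcell : pvCellB d dp' ((a : Int) + 1) ((jc : Int) + 1) = pvF d a jc :=
      pvCellB_correct d dp' n.toNat a jc (by omega) hinv'
    rw [hcell]
    constructor
    · intro a' b' ha' hb'
      rw [PySem.Dict.get?_insert_of_ne _ _ (by intro heq; have := congrArg Prod.fst heq; simp only at this; omega)]
      exact hinv'.1 a' b' ha' hb'
    · intro b' hb'
      rcases eq_or_ne b' jc with rfl | hne
      · rw [PySem.Dict.get?_insert_self]
      · rw [PySem.Dict.get?_insert_of_ne _ _ (by intro heq; have := congrArg Prod.snd heq; simp only at this; omega)]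
        exact hinv'.2 b' (by omega)

lemma pvRows_correct (d : PySem.Dict (Int × Int) (Int × List String)) (n : Int) :
    ∀ (ac : Nat) (dp : PySem.Dict (Int × Int) (Int × List String)),
      pvRowsInv d dp n.toNat 0 →
      pvRowsInv d
        ((List.range ac).foldl
          (fun dp (k : Nat) =>
            (PySem.List.pyRange 1 (n + 1) 1).foldl
              (fun dp j => dp.insert ((1 : Int) + (k : Int), j)
                (pvCellB d dp ((1 : Int) + (k : Int)) j)) dp) dp)
        n.toNat ac := by
  intro ac
  induction ac with
  | zero => intro dp _ a' b' ha' _; omega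
  | succ ac ih =>
    intro dp h0
    rw [List.range_succ, List.foldl_append]
    set dp' := (List.range ac).foldl
      (fun dp (k : Nat) =>
        (PySem.List.pyRange 1 (n + 1) 1).foldl
          (fun dp j => dp.insert ((1 : Int) + (k : Int), j)
            (pvCellB d dp ((1 : Int) + (k : Int)) j)) dp) dp with hdp'
    have hIH : pvRowsInv d dp' n.toNat ac := ih dp h0
    simp only [List.foldl_cons, List.foldl_nil]
    rw [PySem.List.pyRange_one, show ((n + 1 : Int) - 1) = n from by ring, List.foldl_map]
    have hres : pvRowInv d
        ((List.range n.toNat).foldl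
          (fun dp (k : Nat) => dp.insert ((1 : Int) + (ac : Int), (1 : Int) + (k : Int))
            (pvCellB d dp ((1 : Int) + (ac : Int)) ((1 : Int) + (k : Int)))) dp')
        n.toNat ac n.toNat :=
      pvRow_correct d n ac n.toNat dp' le_rfl ⟨hIH, by intro b' hb'; omega⟩
    intro a' b' ha' hb'
    rcases eq_or_ne a' ac with rfl | hne
    · exact hres.2 b' hb'
    · exact hres.1 a' b' (by omega) hb'

lemma pvPre_mem_get? (m n : Int) (memo : Option (List (Int × Int × Int × List String)))
    (h : ∃ e ∈ memo.getD [], e.1 = m ∧ e.2.1 = n) :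
    (pvMemoDict memo).get? (m, n) ≠ none := by
  intro hnone
  rw [PySem.Dict.get?_eq_none_iff_not_mem_keys] at hnone
  apply hnone
  unfold pvMemoDict PySem.Dict.ofList PySem.Dict.update
  rw [PySem.Dict.keys_foldl_insert_key _ Prod.fst (fun d => Prod.snd)]
  rw [PySem.Set.mem_update]
  right
  obtain ⟨e, he, h1, h2⟩ := h
  exact List.mem_map.mpr ⟨((e.1, e.2.1), (e.2.2.1, e.2.2.2)), List.mem_map.mpr ⟨e, he, rfl⟩, by simp [h1, h2]⟩

-- ===== VERDICT (by name: the statement is the Claim_ definition above) =====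
theorem count_and_path_top_down_spec : Claim_equal_count_and_path_top_down := by
  intro m n memo _hdom hpre
  unfold Spec_count_and_path_top_down count_and_path_top_down count_and_path_top_down_alt
  dsimp only []
  cases hd : (pvMemoDict memo).get? (m, n) with
  | some v =>
    rw [pvGoA, hd]
  | none =>
    obtain ⟨hm, hn⟩ : 1 ≤ m ∧ 1 ≤ n := by
      rcases hpre with hmem | h
      · exact absurd hd (pvPre_mem_get? m n memo hmem)
      · exact h
    obtain ⟨a, rfl⟩ : ∃ a : Nat, m = (a : Int) + 1 := ⟨(m - 1).toNat, by omega⟩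
    obtain ⟨b, rfl⟩ : ∃ b : Nat, n = (b : Int) + 1 := ⟨(n - 1).toNat, by omega⟩
    have hinv0 : pvInv (pvMemoDict memo) (pvMemoDict memo) :=
      ⟨fun k v h => h, fun a' b' v h => (pvF_of_some _ a' b' v h).symm⟩
    have hA := (pvGoA_correct (pvMemoDict memo)
      (((a : Int) + 1).toNat + ((b : Int) + 1).toNat + 1) a b
      (pvMemoDict memo) hinv0 (by omega)).1
    rw [hA]
    -- B side: rewrite the row range and apply the table invariant
    rw [PySem.List.pyRange_one 1 (((a : Int) + 1) + 1),
      show ((((a : Int) + 1) + 1) - 1) = ((a + 1 : Nat) : Int) from by push_cast; ring,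
      Int.toNat_natCast]
    simp only [List.foldl_map]
    have hres := pvRows_correct (pvMemoDict memo) ((b : Int) + 1) (a + 1)
      (PySem.Dict.empty : PySem.Dict (Int × Int) (Int × List String))
      (by intro a' b' h _; omega)
    have hget := hres a b (by omega) (by omega)
    rw [PySem.Dict.getD_of_get?_eq_some _ _ hget]
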